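-- pv_equiv track=rewrite | github.com/Renmusxd/PerturbationLib | PerturbationLib/Utilities.py | truncatedPowerset
-- ===== SOURCE A (Python) =====
-- from typing import Sequence, TypeVar, List, Tuple, Generator, Mapping
--
-- T = TypeVar('T')
--
-- def truncatedPowerset(values: Sequence[T], trunc: int, depth: int = 0) -> List[List[T]]:
--     """
--     Get the powerset of values up to order trunc
--     :param values: set of values from which to make powerset
--     :param trunc: maximum size of powerset items
--     :param depth: internal variable to subtract from trunc
--     :return:
--     """
--     if len(values) == 0 or depth >= trunc:
--         return [[]]
--     elif len(values) == 1:
--         h = values[0]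
--         return [[h], []]
--     elif len(values) > 1:
--         h, t = values[0], values[1:]
--         woh = truncatedPowerset(t, trunc, depth)
--         wh = [[h] + l for l in truncatedPowerset(t, trunc, depth+1)]
--         return wh + woh
-- ===== SOURCE B (Python) =====
-- def truncatedPowerset(values, trunc, depth=0):
--     """Iterative right-to-left fold: each step prepends the new element to the
--     subsets still below the size budget k = trunc - depth."""
--     k = trunc - depth
--     res = [[]]
--     for h in reversed(values):
--         res = [[h] + l for l in res if len(l) < k] + res
--     return res
-- ===== Notes on version B (the rewrite author's own statement) =====
-- stated objective: alternative
-- what changed: Replaces the branching recursion (two recursive calls per element, re-deriving the suffix powerset at each depth) by a single right-to-left fold that keeps one list of subsets and prepends each element to the subsets still under the size budget k = trunc - depth.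
import Mathlib
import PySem

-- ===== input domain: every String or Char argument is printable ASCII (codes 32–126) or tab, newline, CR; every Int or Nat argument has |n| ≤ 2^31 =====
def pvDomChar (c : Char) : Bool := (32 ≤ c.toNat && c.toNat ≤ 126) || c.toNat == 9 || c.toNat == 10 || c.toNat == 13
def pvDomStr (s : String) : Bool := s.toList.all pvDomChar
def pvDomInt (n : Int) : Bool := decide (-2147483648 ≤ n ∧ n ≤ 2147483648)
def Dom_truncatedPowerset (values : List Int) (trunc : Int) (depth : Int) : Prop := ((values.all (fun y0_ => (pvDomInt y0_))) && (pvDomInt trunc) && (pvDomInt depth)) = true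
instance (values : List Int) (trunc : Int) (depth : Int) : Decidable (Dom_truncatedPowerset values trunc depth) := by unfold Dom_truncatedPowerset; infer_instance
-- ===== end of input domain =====

-- B replaces A's double recursion by a single right-to-left fold over the values.

-- ===== PORT A =====
def truncatedPowerset : List Int → Int → Int → List (List Int)
  | [], _, _ => [[]]
  | h :: t, trunc, depth =>
    if depth ≥ trunc then [[]]
    else if t = [] then [[h], []]
    else
      let woh := truncatedPowerset t trunc depth
      let wh := (truncatedPowerset t trunc (depth + 1)).map (fun l => h :: l)
      wh ++ woh

-- ===== PORT B =====
-- one step of Source B's loop: res = [[h] + l for l in res if len(l) < k] + res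
def altStep (k : Int) (res : List (List Int)) (h : Int) : List (List Int) :=
  (res.filter (fun l => (l.length : Int) < k)).map (fun l => h :: l) ++ res

def truncatedPowerset_alt (values : List Int) (trunc : Int) (depth : Int) : List (List Int) :=
  let k := trunc - depth
  values.reverse.foldl (altStep k) [[]]

-- ===== PRECONDITION & SPEC =====
def Spec_truncatedPowerset (values : List Int) (trunc : Int) (depth : Int) (out : List (List Int)) : Prop := out = truncatedPowerset_alt values trunc depth
instance (values : List Int) (trunc : Int) (depth : Int) (out : List (List Int)) : Decidable (Spec_truncatedPowerset values trunc depth out) := by unfold Spec_truncatedPowerset; infer_instance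

-- ===== CLAIM (what is proved, stated in full; the proofs are below) =====
def Claim_equal_truncatedPowerset : Prop := ∀ (values : List Int) (trunc : Int) (depth : Int), Dom_truncatedPowerset values trunc depth → Spec_truncatedPowerset values trunc depth (truncatedPowerset values trunc depth)

-- ===== LEMMAS AND PROOFS =====

-- unfolding A once in the length ≥ 2, budget-available case
theorem tp_unfold (h b : Int) (t' : List Int) (trunc depth : Int) (hd : ¬ depth ≥ trunc) :
    truncatedPowerset (h :: b :: t') trunc depth
      = (truncatedPowerset (b :: t') trunc (depth + 1)).map (fun l => h :: l)
          ++ truncatedPowerset (b :: t') trunc depth := by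
  conv_lhs => rw [truncatedPowerset]
  rw [if_neg hd, if_neg (by simp : ¬ ((b :: t' : List Int) = []))]

-- A returns [[]] as soon as the depth budget is exhausted.
theorem tp_of_le (t : List Int) (trunc depth : Int) (h : depth ≥ trunc) :
    truncatedPowerset t trunc depth = [[]] := by
  cases t with
  | nil => rfl
  | cons a t => rw [truncatedPowerset, if_pos h]

-- A's result contains exactly one empty subset.
theorem tp_filter_nil (t : List Int) (trunc depth : Int) :
    (truncatedPowerset t trunc depth).filter (fun l => decide (l.length = 0)) = [[]] := by
  induction t generalizing depth with
  | nil => rfl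
  | cons a t ih =>
    by_cases hd : depth ≥ trunc
    · rw [tp_of_le _ _ _ hd]; rfl
    · cases t with
      | nil =>
        rw [truncatedPowerset, if_neg hd, if_pos rfl]
        rfl
      | cons b t' =>
        rw [tp_unfold a b t' trunc depth hd, List.filter_append, List.filter_map]
        have hmapside : ((truncatedPowerset (b :: t') trunc (depth + 1)).filter
            ((fun l => decide (l.length = 0)) ∘ (fun l => a :: l))) = [] := by
          apply List.filter_eq_nil_iff.mpr
          intro l _; simp
        rw [hmapside, List.map_nil, List.nil_append, ih depth]

-- Deepening by one keeps exactly the subsets strictly below the remaining budget.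
theorem tp_filter (trunc : Int) (t : List Int) (depth : Int) (hlt : depth + 1 ≤ trunc) :
    (truncatedPowerset t trunc depth).filter (fun l => decide ((l.length : Int) < trunc - depth))
      = truncatedPowerset t trunc (depth + 1) := by
  induction t generalizing depth with
  | nil =>
    show ([[]] : List (List Int)).filter _ = [[]]
    simp
    omega
  | cons a t ih =>
    have hd : ¬ depth ≥ trunc := by omega
    cases t with
    | nil =>
      have hL : truncatedPowerset [a] trunc depth = [[a], []] := by
        rw [truncatedPowerset, if_neg hd, if_pos rfl]
      rw [hL]
      by_cases h2 : depth + 1 ≥ trunc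
      · rw [tp_of_le _ _ _ h2]
        have h1 : ¬ ((1 : Int) < trunc - depth) := by omega
        simp [List.filter, h1, show depth < trunc from by omega]
      · have hR : truncatedPowerset [a] trunc (depth + 1) = [[a], []] := by
          rw [truncatedPowerset, if_neg h2, if_pos rfl]
        rw [hR]
        have h1 : ((1 : Int) < trunc - depth) := by omega
        simp [List.filter, h1, show depth < trunc from by omega]
    | cons b t' =>
      rw [tp_unfold a b t' trunc depth hd, List.filter_append, List.filter_map]
      by_cases h2 : depth + 1 ≥ trunc
      · -- remaining budget is exactly 1: only the empty subset survives
        have h1 : trunc - depth = 1 := by omega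
        have hwh : ((truncatedPowerset (b :: t') trunc (depth + 1)).filter
            ((fun l => decide ((l.length : Int) < trunc - depth)) ∘ (fun l => a :: l))) = [] := by
          apply List.filter_eq_nil_iff.mpr
          intro l _; simp [h1]
        have hwoh : ((truncatedPowerset (b :: t') trunc depth).filter
            (fun l => decide ((l.length : Int) < trunc - depth))) = [[]] := by
          have : (fun l : List Int => decide ((l.length : Int) < trunc - depth)) =
              (fun l : List Int => decide (l.length = 0)) := by
            funext l; simp [h1]
          rw [this, tp_filter_nil]
        rw [hwh, hwoh]
        simp [tp_of_le (a :: b :: t') trunc (depth + 1) h2]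
      · have hcond : ((fun l : List Int => decide ((l.length : Int) < trunc - depth)) ∘ (fun l => a :: l)) =
            (fun l : List Int => decide ((l.length : Int) < trunc - (depth + 1))) := by
          funext l; simp; omega
        rw [hcond, ih (depth + 1) (by omega), ih depth hlt,
          tp_unfold a b t' trunc (depth + 1) (by omega)]

-- Main invariant: A equals B's right fold with the fixed budget trunc - depth.
theorem tp_eq_foldr (trunc : Int) (values : List Int) (depth : Int) :
    truncatedPowerset values trunc depth
      = values.foldr (fun h res => altStep (trunc - depth) res h) [[]] := by
  induction values generalizing depth with
  | nil => rfl
  | cons h t ih =>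
    rw [List.foldr_cons, ← ih depth]
    by_cases hd : depth ≥ trunc
    · rw [tp_of_le (h :: t) trunc depth hd, tp_of_le t trunc depth hd]
      unfold altStep
      have : (([[]] : List (List Int)).filter (fun l => (l.length : Int) < trunc - depth)) = [] := by
        simp; omega
      rw [this]; rfl
    · cases t with
      | nil =>
        have hL : truncatedPowerset [h] trunc depth = [[h], []] := by
          rw [truncatedPowerset, if_neg hd, if_pos rfl]
        rw [hL]
        unfold altStep
        have hnil : truncatedPowerset [] trunc depth = [[]] := rfl
        rw [hnil]
        have : (([[]] : List (List Int)).filter (fun l => decide ((l.length : Int) < trunc - depth))) = [[]] := by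
          simp; omega
        rw [this]
        rfl
      | cons b t' =>
        rw [tp_unfold h b t' trunc depth hd,
          ← tp_filter trunc (b :: t') depth (by omega)]
        rfl

-- ===== VERDICT (by name: the statement is the Claim_ definition above) =====
theorem truncatedPowerset_spec : Claim_equal_truncatedPowerset := by
  intro values trunc depth _
  unfold Spec_truncatedPowerset truncatedPowerset_alt
  rw [List.foldl_reverse, tp_eq_foldr]
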